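-- pv_equiv track=rewrite | github.com/tm1897/mlg_cs224w_project | src/evaluator.py | compute_normalized_ranks
-- ===== SOURCE A (Python) =====
-- def compute_normalized_ranks(train, test, recommended):
--     train = train.copy()
--     test = test.copy()
--     recommended = recommended.copy()
--
--     # Remove train items from recommended
--     # Items seen in train will not be recommended to users
--     for item in train:
--         recommended.remove(item)
--
--     ranks = []
--
--     # Iterate through all test items
--     for item in test:
--         try:
--             rank = recommended.index(item) + 1  # Indices start with 0, ranks with 1
--         except ValueError:
--             # Item was not seen in train set
--             rank = None
--         else:
--             recommended.remove(item)
--         finally: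
--             ranks.append(rank)
--     return ranks
-- ===== SOURCE B (Python) =====
-- def compute_normalized_ranks(train, test, recommended):
--     # Position-map strategy: index recommended once (value -> stack of positions,
--     # smallest on top), keep a sorted list of removed positions, and answer each
--     # query by binary search instead of rescanning the recommendation list.
--     positions = {}
--     for i in range(len(recommended) - 1, -1, -1):
--         positions.setdefault(recommended[i], []).append(i)
--
--     removed = []  # sorted list of already-removed original positions
--
--     def take(item):
--         stack = positions.get(item)
--         if not stack:
--             return None
--         i = stack.pop()
--         # binary search: lo = number of removed positions < i
--         lo, hi = 0, len(removed)
--         while lo < hi: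
--             mid = (lo + hi) // 2
--             if removed[mid] < i:
--                 lo = mid + 1
--             else:
--                 hi = mid
--         removed.insert(lo, i)
--         return i - lo  # number of still-active positions before i
--
--     for item in train:
--         take(item)
--
--     ranks = []
--     for item in test:
--         r = take(item)
--         ranks.append(None if r is None else r + 1)
--     return ranks
-- ===== Notes on version B (the rewrite author's own statement) =====
-- stated objective: faster
-- what changed: Instead of mutating the recommendation list with repeated O(n) list.index/list.remove scans, B indexes recommended once into a value->positions map and keeps a sorted list of removed positions, answering each train/test item by one stack pop plus a binary search (rank = position minus removed-before count).
import Mathlib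
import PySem

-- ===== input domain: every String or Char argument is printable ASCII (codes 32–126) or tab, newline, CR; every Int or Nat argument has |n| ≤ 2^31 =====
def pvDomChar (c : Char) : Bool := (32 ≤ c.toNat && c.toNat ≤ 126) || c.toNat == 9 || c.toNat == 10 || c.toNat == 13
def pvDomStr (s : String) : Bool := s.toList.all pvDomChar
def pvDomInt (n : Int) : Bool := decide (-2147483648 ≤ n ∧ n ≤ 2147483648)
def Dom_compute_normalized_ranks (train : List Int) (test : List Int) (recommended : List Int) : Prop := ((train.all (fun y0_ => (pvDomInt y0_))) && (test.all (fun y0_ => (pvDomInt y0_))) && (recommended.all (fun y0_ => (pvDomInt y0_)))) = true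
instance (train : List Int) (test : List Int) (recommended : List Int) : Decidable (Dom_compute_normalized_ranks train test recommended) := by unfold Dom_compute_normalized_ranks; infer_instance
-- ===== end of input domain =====

-- B replaces A's repeated list.index/list.remove scans by a one-time position map
-- (value -> stack of positions) plus a sorted list of removed positions queried by
-- binary search; measured faster (return value only — A mutates no caller-visible data,
-- since it copies its arguments first).

-- ===== PORT A =====
-- step of A's test loop: try index/except/else/finally
def pvStepA (st : List Int × List (Option Int)) (item : Int) : List Int × List (Option Int) :=
  match PySem.List.index? st.1 item with
  | none => (st.1, st.2 ++ [none])
  | some k => ((PySem.List.remove? st.1 item).getD st.1, st.2 ++ [some ((k : Int) + 1)])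

def compute_normalized_ranks (train : List Int) (test : List Int) (recommended : List Int) : List (Option Int) :=
  -- for item in train: recommended.remove(item)  (ValueError propagates: none)
  match train.foldl (fun acc item => acc.bind (fun cur => PySem.List.remove? cur item)) (some recommended) with
  | none => []  -- Python raised ValueError here; excluded by Pre_
  | some cur => (test.foldl pvStepA (cur, ([] : List (Option Int)))).2

-- ===== PORT B =====
def pvVal (recommended : List Int) (i : Int) : Int := PySem.List.pyGetD recommended i 0

-- the hand-written binary-search loop of Source B (lo/hi as in the Python; the fuel
-- argument only makes the while-loop total: it starts at hi - lo and each round halves it)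
def pvBisectGo (removed : List Int) (i : Int) : Nat → Int → Int → Int
  | 0, lo, _hi => lo
  | Nat.succ fuel, lo, hi =>
    if lo < hi then
      let mid := PySem.Int.floordiv (lo + hi) 2
      if PySem.List.pyGetD removed mid 0 < i then pvBisectGo removed i fuel (mid + 1) hi
      else pvBisectGo removed i fuel lo mid
    else lo

def pvBisect (removed : List Int) (i : Int) (lo hi : Int) : Int :=
  pvBisectGo removed i (hi - lo).toNat lo hi

-- positions = {}; for i in range(len(recommended)-1, -1, -1): positions.setdefault(recommended[i], []).append(i)
def pvBuildPos (recommended : List Int) : PySem.Dict Int (List Int) :=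
  (PySem.List.pyRange ((recommended.length : Int) - 1) (-1) (-1)).foldl
    (fun d i => PySem.Dict.insert d (pvVal recommended i) (PySem.Dict.getD d (pvVal recommended i) [] ++ [i]))
    PySem.Dict.empty

-- def take(item): ...
def pvTake (pos : PySem.Dict Int (List Int)) (removed : List Int) (item : Int) :
    PySem.Dict Int (List Int) × List Int × Option Int :=
  match PySem.Dict.get? pos item with
  | none => (pos, removed, none)
  | some [] => (pos, removed, none)
  | some (x :: xs) =>
      let i := (x :: xs).getLast (List.cons_ne_nil x xs)
      let lo := pvBisect removed i 0 (removed.length : Int)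
      (PySem.Dict.insert pos item (x :: xs).dropLast, (PySem.List.insert removed lo i, some (i - lo)))

def pvStepTrain (st : PySem.Dict Int (List Int) × List Int) (item : Int) :
    PySem.Dict Int (List Int) × List Int :=
  let t := pvTake st.1 st.2 item
  (t.1, t.2.1)

def pvStepTest (st : (PySem.Dict Int (List Int) × List Int) × List (Option Int)) (item : Int) :
    (PySem.Dict Int (List Int) × List Int) × List (Option Int) :=
  let t := pvTake st.1.1 st.1.2 item
  ((t.1, t.2.1), st.2 ++ [match t.2.2 with | none => none | some q => some (q + 1)])

def compute_normalized_ranks_alt (train : List Int) (test : List Int) (recommended : List Int) : List (Option Int) :=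
  let pos0 := pvBuildPos recommended
  let st1 := train.foldl pvStepTrain (pos0, [])
  (test.foldl pvStepTest (st1, ([] : List (Option Int)))).2

-- ===== PRECONDITION & SPEC =====
-- Pre_ excludes exactly the inputs on which A raises ValueError: some train item occurs
-- more often in train than in recommended, so a recommended.remove(item) call fails.
def Pre_compute_normalized_ranks (train : List Int) (test : List Int) (recommended : List Int) : Prop :=
  ∀ v ∈ train, train.count v ≤ recommended.count v
instance (train : List Int) (test : List Int) (recommended : List Int) : Decidable (Pre_compute_normalized_ranks train test recommended) := by unfold Pre_compute_normalized_ranks; infer_instance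

def pvWitness_compute_normalized_ranks : List Int × List Int × List Int := ([1], [2, 3], [1, 2, 3])

def Spec_compute_normalized_ranks (train : List Int) (test : List Int) (recommended : List Int) (out : List (Option Int)) : Prop := out = compute_normalized_ranks_alt train test recommended
instance (train : List Int) (test : List Int) (recommended : List Int) (out : List (Option Int)) : Decidable (Spec_compute_normalized_ranks train test recommended out) := by unfold Spec_compute_normalized_ranks; infer_instance

-- ===== CLAIM (what is proved, stated in full; the proofs are below) =====
def Claim_equal_compute_normalized_ranks : Prop := ∀ (train : List Int) (test : List Int) (recommended : List Int), Dom_compute_normalized_ranks train test recommended → Pre_compute_normalized_ranks train test recommended → Spec_compute_normalized_ranks train test recommended (compute_normalized_ranks train test recommended)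

-- ===== LEMMAS AND PROOFS =====

-- B's state is linked to A's shrinking recommendation list through the list s of
-- still-active positions (sorted): A's list is s.map (pvVal r).
def pvInv (r s removed : List Int) (pos : PySem.Dict Int (List Int)) : Prop :=
  s.Pairwise (· < ·) ∧ removed.Pairwise (· < ·) ∧
  (removed ++ s).Perm (PySem.List.pyRange 0 (r.length : Int)) ∧
  ∀ v, PySem.Dict.getD pos v [] = (s.filter (fun i => pvVal r i == v)).reverse

lemma pvInsert_eq (xs : List Int) (i : Int) (v : Int) (h0 : 0 ≤ i) (h1 : i ≤ (xs.length : Int)) :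
    PySem.List.insert xs i v = xs.take i.toNat ++ v :: xs.drop i.toNat := by
  simp only [PySem.List.insert, PySem.List.sliceIndices]
  norm_num
  rw [if_neg (by omega), min_eq_left h1]

lemma pvSorted_take_drop (xs : List Int) (i : Int) (hs : xs.Pairwise (· < ·)) :
    (∀ x ∈ xs.take (xs.countP (fun j => decide (j < i))), x < i) ∧
    (∀ x ∈ xs.drop (xs.countP (fun j => decide (j < i))), ¬ x < i) := by
  induction xs with
  | nil => simp
  | cons a t ih =>
    obtain ⟨ha, ht⟩ := List.pairwise_cons.mp hs
    obtain ⟨ih1, ih2⟩ := ih ht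
    by_cases hai : a < i
    · have hc : (a :: t).countP (fun j => decide (j < i)) = t.countP (fun j => decide (j < i)) + 1 := by
        rw [List.countP_cons]; simp [hai]
      rw [hc]
      constructor
      · intro x hx
        rw [List.take_succ_cons] at hx
        rcases List.mem_cons.mp hx with rfl | hx
        · exact hai
        · exact ih1 x hx
      · intro x hx
        rw [List.drop_succ_cons] at hx
        exact ih2 x hx
    · have hz : (a :: t).countP (fun j => decide (j < i)) = 0 := by
        rw [List.countP_eq_zero]
        intro x hx
        rcases List.mem_cons.mp hx with rfl | hx
        · simpa using hai
        · have := ha x hx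
          simp; omega
      rw [hz]
      refine ⟨by simp, ?_⟩
      intro x hx
      rcases List.mem_cons.mp hx with rfl | hx
      · exact hai
      · have := ha x hx; omega

lemma pvBisectGo_spec (xs : List Int) (i : Int) (hs : xs.Pairwise (· < ·)) :
    ∀ (fuel : Nat) (lo hi : Int), (hi - lo).toNat ≤ fuel → 0 ≤ lo → hi ≤ (xs.length : Int) →
      lo ≤ (xs.countP (fun j => decide (j < i)) : Int) →
      (xs.countP (fun j => decide (j < i)) : Int) ≤ hi →
      pvBisectGo xs i fuel lo hi = (xs.countP (fun j => decide (j < i)) : Int) := by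
  intro fuel
  induction fuel with
  | zero =>
    intro lo hi hf h0 hlen hlc hch
    simp only [pvBisectGo]
    omega
  | succ f ih =>
    intro lo hi hf h0 hlen hlc hch
    by_cases hlh : lo < hi
    · simp only [pvBisectGo, if_pos hlh]
      have hb := PySem.Int.floordiv_two_mid_bounds (le_of_lt hlh)
      have hmidlt : PySem.Int.floordiv (lo + hi) 2 < hi := by
        rw [PySem.Int.floordiv_lt_iff_lt_mul (by norm_num)]; omega
      set mid := PySem.Int.floordiv (lo + hi) 2 with hmid
      have h0m : 0 ≤ mid := le_trans h0 hb.1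
      have hmlen : mid < (xs.length : Int) := lt_of_lt_of_le hmidlt hlen
      have hget := PySem.List.pyGetD_eq_getElem xs (i := mid) 0 h0m hmlen
      rw [hget]
      have hmn : mid.toNat < xs.length := by omega
      by_cases hx : xs[mid.toNat] < i
      · rw [if_pos hx]
        apply ih (mid + 1) hi (by omega) (by omega) hlen ?_ hch
        by_contra h'
        have hcm : xs.countP (fun j => decide (j < i)) ≤ mid.toNat := by omega
        have hmem : xs[mid.toNat] ∈ xs.drop (xs.countP (fun j => decide (j < i))) := by
          have hj : mid.toNat - xs.countP (fun j => decide (j < i)) < (xs.drop (xs.countP (fun j => decide (j < i)))).length := by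
            simp [List.length_drop]; omega
          have heq : xs[mid.toNat] = (xs.drop (xs.countP (fun j => decide (j < i))))[mid.toNat - xs.countP (fun j => decide (j < i))]'hj := by
            rw [List.getElem_drop]
            congr 1
            omega
          rw [heq]
          exact List.getElem_mem hj
        exact absurd hx ((pvSorted_take_drop xs i hs).2 _ hmem)
      · rw [if_neg hx]
        apply ih lo mid (by omega) h0 (le_of_lt hmlen) hlc ?_
        by_contra h'
        have hcm : mid.toNat < xs.countP (fun j => decide (j < i)) := by omega
        have hcl : xs.countP (fun j => decide (j < i)) ≤ xs.length := List.countP_le_length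
        have hmem : xs[mid.toNat] ∈ xs.take (xs.countP (fun j => decide (j < i))) := by
          have hj : mid.toNat < (xs.take (xs.countP (fun j => decide (j < i)))).length := by
            simp [List.length_take]; omega
          have hg : (xs.take (xs.countP (fun j => decide (j < i))))[mid.toNat]'hj = xs[mid.toNat] := List.getElem_take
          exact hg ▸ List.getElem_mem hj
        exact absurd ((pvSorted_take_drop xs i hs).1 _ hmem) hx
    · simp only [pvBisectGo, if_neg hlh]
      omega

lemma pvBisect_spec (xs : List Int) (i : Int) (hs : xs.Pairwise (· < ·)) :
    ∀ (lo hi : Int), 0 ≤ lo → hi ≤ (xs.length : Int) →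
      lo ≤ (xs.countP (fun j => decide (j < i)) : Int) →
      (xs.countP (fun j => decide (j < i)) : Int) ≤ hi →
      pvBisect xs i lo hi = (xs.countP (fun j => decide (j < i)) : Int) :=
  fun lo hi h0 hlen hlc hch => pvBisectGo_spec xs i hs _ lo hi (le_refl _) h0 hlen hlc hch

lemma pvCountP_pyRange (N i : Int) (h0 : 0 ≤ i) (h1 : i ≤ N) :
    (PySem.List.pyRange 0 N).countP (fun j => decide (j < i)) = i.toNat := by
  rw [PySem.List.pyRange_one_append 0 i N h0 h1, List.countP_append]
  have h2 : (PySem.List.pyRange 0 i).countP (fun j => decide (j < i)) = (PySem.List.pyRange 0 i).length := by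
    rw [List.countP_eq_length]
    intro a ha
    simp [PySem.List.mem_pyRange_one.mp ha]
  have h3 : (PySem.List.pyRange i N).countP (fun j => decide (j < i)) = 0 := by
    rw [List.countP_eq_zero]
    intro a ha
    have := PySem.List.mem_pyRange_one.mp ha
    simp; omega
  rw [h2, h3, PySem.List.length_pyRange_one]; omega

lemma pvBuildFold_getD (r : List Int) (L : List Int) (d : PySem.Dict Int (List Int)) (v : Int) :
    PySem.Dict.getD (L.foldl (fun d i => PySem.Dict.insert d (pvVal r i) (PySem.Dict.getD d (pvVal r i) [] ++ [i])) d) v []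
      = PySem.Dict.getD d v [] ++ L.filter (fun i => pvVal r i == v) := by
  induction L generalizing d with
  | nil => simp
  | cons a L ih =>
    rw [List.foldl_cons, ih, List.filter_cons, PySem.Dict.getD_insert]
    by_cases hva : v = pvVal r a
    · simp [hva]
    · rw [if_neg hva]
      have : (pvVal r a == v) = false := by simp; exact fun h => hva h.symm
      simp [this]

lemma pvBuildPos_getD (r : List Int) (v : Int) :
    PySem.Dict.getD (pvBuildPos r) v []
      = ((PySem.List.pyRange 0 (r.length : Int)).filter (fun i => pvVal r i == v)).reverse := by
  unfold pvBuildPos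
  rw [PySem.List.pyRange_neg_one_eq_reverse,
      show ((-1 : Int) + 1) = 0 by norm_num,
      show ((r.length : Int) - 1 + 1) = (r.length : Int) by ring,
      pvBuildFold_getD]
  simp [List.filter_reverse]

lemma pvInv_init (r : List Int) :
    pvInv r (PySem.List.pyRange 0 (r.length : Int)) [] (pvBuildPos r) :=
  ⟨PySem.List.pairwise_lt_pyRange_one 0 _, List.Pairwise.nil, by simp, fun v => pvBuildPos_getD r v⟩

lemma pvMap_init (r : List Int) :
    (PySem.List.pyRange 0 (r.length : Int)).map (pvVal r) = r :=
  PySem.List.map_pyGetD_pyRange_zero' r 0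

lemma pvTake_not_found (r s removed : List Int) (pos : PySem.Dict Int (List Int)) (v : Int)
    (inv : pvInv r s removed pos) (h : s.filter (fun i => pvVal r i == v) = []) :
    pvTake pos removed v = (pos, removed, none) := by
  have hd : PySem.Dict.getD pos v [] = [] := by rw [inv.2.2.2 v, h]; rfl
  rw [PySem.Dict.getD_eq_get?_getD] at hd
  cases hg : PySem.Dict.get? pos v with
  | none => simp only [pvTake, hg]
  | some l =>
    rw [hg] at hd
    simp only [Option.getD_some] at hd
    subst hd
    simp only [pvTake, hg]

lemma pvIndex?_not_found (r s : List Int) (v : Int)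
    (h : s.filter (fun i => pvVal r i == v) = []) :
    PySem.List.index? (s.map (pvVal r)) v = none := by
  rw [PySem.List.index?_eq_none_iff]
  simp only [List.mem_map]
  rintro ⟨j, hj, hje⟩
  have := List.filter_eq_nil_iff.mp h j hj
  simp [hje] at this

lemma pvIndex?_found (r s₁ s₂ : List Int) (i₀ v : Int)
    (h₁ : ∀ j ∈ s₁, pvVal r j ≠ v) (hv : pvVal r i₀ = v) :
    PySem.List.index? ((s₁ ++ i₀ :: s₂).map (pvVal r)) v = some s₁.length := by
  rw [PySem.List.index?_eq_some_iff]
  refine ⟨s₁.map (pvVal r), s₂.map (pvVal r), by simp [hv], by simp, ?_⟩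
  simp only [List.mem_map]
  rintro ⟨j, hj, hje⟩
  exact h₁ j hj hje

lemma pvRemove?_found (r s₁ s₂ : List Int) (i₀ v : Int)
    (h₁ : ∀ j ∈ s₁, pvVal r j ≠ v) (hv : pvVal r i₀ = v) :
    PySem.List.remove? ((s₁ ++ i₀ :: s₂).map (pvVal r)) v = some ((s₁ ++ s₂).map (pvVal r)) := by
  revert h₁
  induction s₁ with
  | nil => intro _; simp [hv, PySem.List.remove?_cons_self]
  | cons a t ih =>
    intro h₁
    simp only [List.cons_append, List.map_cons]
    rw [PySem.List.remove?_cons_of_ne _ (h₁ a (by simp)), ih (fun j hj => h₁ j (by simp [hj]))]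
    rfl

lemma pvTake_found (r s₁ s₂ removed : List Int) (pos : PySem.Dict Int (List Int)) (i₀ v : Int)
    (inv : pvInv r (s₁ ++ i₀ :: s₂) removed pos)
    (h₁ : ∀ j ∈ s₁, pvVal r j ≠ v) (hv : pvVal r i₀ = v) :
    ∃ pos' removed', pvTake pos removed v = (pos', removed', some (s₁.length : Int)) ∧
      pvInv r (s₁ ++ s₂) removed' pos' := by
  have h0fil : s₁.filter (fun i => pvVal r i == v) = [] :=
    List.filter_eq_nil_iff.mpr (fun j hj => by simp [h₁ j hj])
  have hfil : (s₁ ++ i₀ :: s₂).filter (fun i => pvVal r i == v)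
      = i₀ :: s₂.filter (fun i => pvVal r i == v) := by
    rw [List.filter_append, List.filter_cons, h0fil]
    simp [hv]
  have hd : PySem.Dict.getD pos v []
      = (s₂.filter (fun i => pvVal r i == v)).reverse ++ [i₀] := by
    rw [inv.2.2.2 v, hfil]
    simp
  rw [PySem.Dict.getD_eq_get?_getD] at hd
  cases hg : PySem.Dict.get? pos v with
  | none => rw [hg] at hd; simp at hd
  | some l =>
  rw [hg] at hd
  simp only [Option.getD_some] at hd
  cases l with
  | nil => simp at hd
  | cons x xs =>
  have hlast : (x :: xs).getLast (List.cons_ne_nil x xs) = i₀ := by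
    have h2 : (x :: xs).getLast? = some i₀ := by rw [hd]; exact List.getLast?_concat
    rw [List.getLast?_eq_some_getLast (List.cons_ne_nil x xs)] at h2
    exact Option.some_injective _ h2
  have hdrop : (x :: xs).dropLast = (s₂.filter (fun i => pvVal r i == v)).reverse := by
    rw [hd]
    exact List.dropLast_concat ..
  -- facts about i₀
  have hmem : i₀ ∈ removed ++ (s₁ ++ i₀ :: s₂) := by simp
  have hrange : i₀ ∈ PySem.List.pyRange 0 (r.length : Int) := inv.2.2.1.mem_iff.mp hmem
  have hbounds := PySem.List.mem_pyRange_one.mp hrange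
  have hnd : (removed ++ (s₁ ++ i₀ :: s₂)).Nodup :=
    inv.2.2.1.nodup_iff.mpr (PySem.List.nodup_pyRange_one 0 _)
  have hnotmem : i₀ ∉ removed := fun hin =>
    (List.disjoint_of_nodup_append hnd) hin (by simp)
  -- the binary search returns the number of removed positions below i₀
  have hc_le : removed.countP (fun j => decide (j < i₀)) ≤ removed.length := List.countP_le_length
  have hbis : pvBisect removed i₀ 0 (removed.length : Int)
      = (removed.countP (fun j => decide (j < i₀)) : Int) :=
    pvBisect_spec removed i₀ inv.2.1 0 (removed.length : Int) (le_refl 0) (le_refl _)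
      (by positivity) (by exact_mod_cast hc_le)
  -- counting: removed-count + active-count below i₀ = i₀
  have hcnt : removed.countP (fun j => decide (j < i₀))
      + (s₁ ++ i₀ :: s₂).countP (fun j => decide (j < i₀)) = i₀.toNat := by
    have := inv.2.2.1.countP_eq (fun j => decide (j < i₀))
    rw [List.countP_append] at this
    rw [this, pvCountP_pyRange _ _ hbounds.1 (le_of_lt hbounds.2)]
  have hp := List.pairwise_append.mp inv.1
  have hs1len : (s₁ ++ i₀ :: s₂).countP (fun j => decide (j < i₀)) = s₁.length := by
    rw [List.countP_append, List.countP_cons]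
    have e1 : s₁.countP (fun j => decide (j < i₀)) = s₁.length :=
      List.countP_eq_length.mpr (fun j hj => by simp [hp.2.2 j hj i₀ (by simp)])
    have e2 : s₂.countP (fun j => decide (j < i₀)) = 0 :=
      List.countP_eq_zero.mpr (fun y hy => by
        have := (List.pairwise_cons.mp hp.2.1).1 y hy
        simp; omega)
    simp [e1, e2]
  have hval : i₀ - (removed.countP (fun j => decide (j < i₀)) : Int) = (s₁.length : Int) := by
    omega
  -- reduce pvTake
  refine ⟨PySem.Dict.insert pos v (s₂.filter (fun i => pvVal r i == v)).reverse,
    PySem.List.insert removed (removed.countP (fun j => decide (j < i₀)) : Int) i₀, ?_, ?_⟩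
  · simp only [pvTake, hg]
    rw [hlast, hdrop, hbis, hval]
  · -- the invariant is preserved
    have hins : PySem.List.insert removed (removed.countP (fun j => decide (j < i₀)) : Int) i₀
        = removed.take (removed.countP (fun j => decide (j < i₀)))
          ++ i₀ :: removed.drop (removed.countP (fun j => decide (j < i₀))) := by
      rw [pvInsert_eq _ _ _ (by positivity) (by exact_mod_cast hc_le)]
      simp
    have hS := pvSorted_take_drop removed i₀ inv.2.1
    have hsplitp : (removed.take (removed.countP (fun j => decide (j < i₀)))
        ++ removed.drop (removed.countP (fun j => decide (j < i₀)))).Pairwise (· < ·) := by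
      rw [List.take_append_drop]; exact inv.2.1
    have hcross := (List.pairwise_append.mp hsplitp).2.2
    refine ⟨?_, ?_, ?_, ?_⟩
    · exact inv.1.sublist ((List.sublist_cons_self i₀ s₂).append_left s₁)
    · rw [hins]
      rw [List.pairwise_append]
      refine ⟨inv.2.1.sublist (List.take_sublist _ _), ?_, ?_⟩
      · rw [List.pairwise_cons]
        refine ⟨?_, inv.2.1.sublist (List.drop_sublist _ _)⟩
        intro y hy
        have h1 := hS.2 y hy
        have h2 : y ≠ i₀ := fun he => hnotmem (he ▸ List.drop_subset _ _ hy)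
        omega
      · intro a ha b hb
        rcases List.mem_cons.mp hb with rfl | hb
        · exact hS.1 a ha
        · exact hcross a ha b hb
    · have h1 : (PySem.List.insert removed (removed.countP (fun j => decide (j < i₀)) : Int) i₀).Perm
          (i₀ :: removed) := by
        rw [hins]
        have := List.perm_middle (a := i₀)
          (l₁ := removed.take (removed.countP (fun j => decide (j < i₀))))
          (l₂ := removed.drop (removed.countP (fun j => decide (j < i₀))))
        rwa [List.take_append_drop] at this
      have hp3 : (removed ++ (s₁ ++ i₀ :: s₂)).Perm (i₀ :: (removed ++ (s₁ ++ s₂))) := by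
        have e1 : removed ++ (s₁ ++ i₀ :: s₂) = (removed ++ s₁) ++ i₀ :: s₂ :=
          (List.append_assoc _ _ _).symm
        have e2 : (removed ++ s₁) ++ s₂ = removed ++ (s₁ ++ s₂) := List.append_assoc _ _ _
        rw [e1]
        exact e2 ▸ List.perm_middle
      exact ((h1.append_right _).trans hp3.symm).trans inv.2.2.1
    · intro w
      rw [PySem.Dict.getD_insert]
      by_cases hw : w = v
      · subst hw
        rw [if_pos rfl, List.filter_append, h0fil]
        simp
      · rw [if_neg hw, inv.2.2.2 w, List.filter_append, List.filter_append, List.filter_cons]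
        have : (pvVal r i₀ == w) = false := by
          simp [hv]
          exact fun he => hw he.symm
        simp [this]

lemma pvTestPhase (r : List Int) (items : List Int) :
    ∀ (s removed : List Int) (pos : PySem.Dict Int (List Int)) (acc : List (Option Int)),
    pvInv r s removed pos →
    (items.foldl pvStepA (s.map (pvVal r), acc)).2 = (items.foldl pvStepTest ((pos, removed), acc)).2 := by
  induction items with
  | nil => intro s removed pos acc _; rfl
  | cons v rest ih =>
    intro s removed pos acc inv
    cases hf : s.filter (fun i => pvVal r i == v) with
    | nil =>
      have hA : pvStepA (s.map (pvVal r), acc) v = (s.map (pvVal r), acc ++ [none]) := by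
        simp only [pvStepA, pvIndex?_not_found r s v hf]
      have hB : pvStepTest ((pos, removed), acc) v = ((pos, removed), acc ++ [none]) := by
        simp only [pvStepTest, pvTake_not_found r s removed pos v inv hf]
      rw [List.foldl_cons, List.foldl_cons, hA, hB]
      exact ih s removed pos (acc ++ [none]) inv
    | cons i₀ t =>
      obtain ⟨s₁, s₂, hdec, h₁', hP, ht⟩ := List.filter_eq_cons_iff.mp hf
      have h₁ : ∀ j ∈ s₁, pvVal r j ≠ v := fun j hj => by simpa using h₁' j hj
      have hv : pvVal r i₀ = v := by simpa using hP
      subst hdec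
      obtain ⟨pos', removed', hT, inv'⟩ := pvTake_found r s₁ s₂ removed pos i₀ v inv h₁ hv
      have hA : pvStepA ((s₁ ++ i₀ :: s₂).map (pvVal r), acc) v
          = ((s₁ ++ s₂).map (pvVal r), acc ++ [some ((s₁.length : Int) + 1)]) := by
        simp only [pvStepA, pvIndex?_found r s₁ s₂ i₀ v h₁ hv,
          pvRemove?_found r s₁ s₂ i₀ v h₁ hv, Option.getD_some]
      have hB : pvStepTest ((pos, removed), acc) v
          = ((pos', removed'), acc ++ [some ((s₁.length : Int) + 1)]) := by
        simp only [pvStepTest, hT]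
      rw [List.foldl_cons, List.foldl_cons, hA, hB]
      exact ih (s₁ ++ s₂) removed' pos' (acc ++ [some ((s₁.length : Int) + 1)]) inv'

lemma pvTrainPhase (r : List Int) (items : List Int) :
    ∀ (s removed : List Int) (pos : PySem.Dict Int (List Int)),
    pvInv r s removed pos →
    (∀ v, items.count v ≤ ((s.map (pvVal r)).count v)) →
    ∃ s', items.foldl (fun acc item => acc.bind (fun cur => PySem.List.remove? cur item)) (some (s.map (pvVal r)))
            = some (s'.map (pvVal r)) ∧
      pvInv r s' (items.foldl pvStepTrain (pos, removed)).2 (items.foldl pvStepTrain (pos, removed)).1 := by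
  induction items with
  | nil => intro s removed pos inv _; exact ⟨s, rfl, inv⟩
  | cons v rest ih =>
    intro s removed pos inv hc
    have hcv := hc v
    rw [List.count_cons_self] at hcv
    have hvmem : v ∈ s.map (pvVal r) := List.count_pos_iff.mp (by omega)
    obtain ⟨j, hj, hje⟩ := List.mem_map.mp hvmem
    cases hf : s.filter (fun i => pvVal r i == v) with
    | nil =>
      have hcontra := List.filter_eq_nil_iff.mp hf j hj
      rw [hje] at hcontra
      exact absurd (beq_self_eq_true v) hcontra
    | cons i₀ t =>
      obtain ⟨s₁, s₂, hdec, h₁', hP, ht⟩ := List.filter_eq_cons_iff.mp hf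
      have h₁ : ∀ j ∈ s₁, pvVal r j ≠ v := fun j hj => by simpa using h₁' j hj
      have hv : pvVal r i₀ = v := by simpa using hP
      subst hdec
      obtain ⟨pos', removed', hT, inv'⟩ := pvTake_found r s₁ s₂ removed pos i₀ v inv h₁ hv
      have hrest : ∀ w, rest.count w ≤ (((s₁ ++ s₂).map (pvVal r)).count w) := by
        intro w
        have hcw := hc w
        rw [List.count_cons] at hcw
        by_cases hwv : w = v
        · subst hwv
          simp only [List.map_append, List.map_cons, List.count_append, List.count_cons,
            hv] at hcw ⊢
          split_ifs at hcw ⊢ <;> omega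
        · have e1 : (v == w) = false := by simp; exact fun he => hwv he.symm
          have e2 : (pvVal r i₀ == w) = false := by rw [hv]; exact e1
          simp only [List.map_append, List.map_cons, List.count_append, List.count_cons,
            e1, e2] at hcw ⊢
          omega
      obtain ⟨s', hfold, inv''⟩ := ih (s₁ ++ s₂) removed' pos' inv' hrest
      refine ⟨s', ?_, ?_⟩
      · rw [List.foldl_cons]
        simp only [Option.bind_some, pvRemove?_found r s₁ s₂ i₀ v h₁ hv]
        exact hfold
      · have hB : pvStepTrain (pos, removed) v = (pos', removed') := by
          simp only [pvStepTrain, hT]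
        rw [List.foldl_cons, hB]
        exact inv''

-- ===== VERDICT (by name: the statement is the Claim_ definition above) =====
theorem compute_normalized_ranks_spec : Claim_equal_compute_normalized_ranks := by
  intro train test rec _hdom hpre
  unfold Spec_compute_normalized_ranks compute_normalized_ranks compute_normalized_ranks_alt
  have hmap := pvMap_init rec
  have hcount : ∀ v, train.count v
      ≤ ((PySem.List.pyRange 0 (rec.length : Int)).map (pvVal rec)).count v := by
    intro v
    rw [hmap]
    by_cases hv : v ∈ train
    · exact hpre v hv
    · simp [List.count_eq_zero_of_not_mem hv]
  obtain ⟨s', hfold, inv'⟩ :=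
    pvTrainPhase rec train (PySem.List.pyRange 0 (rec.length : Int)) [] (pvBuildPos rec)
      (pvInv_init rec) hcount
  rw [hmap] at hfold
  rw [hfold]
  have hT := pvTestPhase rec test s' (train.foldl pvStepTrain (pvBuildPos rec, [])).2
    (train.foldl pvStepTrain (pvBuildPos rec, [])).1 [] inv'
  rw [Prod.mk.eta] at hT
  exact hT
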